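-- pv_equiv track=rewrite | github.com/amanjot-a/RHP-Scan | RHP.py | risk_analysis
-- ===== SOURCE A (Python) =====
-- from collections import Counter
--
-- def risk_analysis(text):
--     risk_keywords = [
--         "litigation", "penalty", "regulatory", "dependent",
--         "volatile", "uncertain", "loss", "adverse", "risk"
--     ]
--     words = text.split()
--     counts = Counter(words)
--
--     risk_score = sum(counts[k] for k in risk_keywords)
--
--     if risk_score > 300:
--         level = "HIGH"
--     elif risk_score > 150:
--         level = "MEDIUM"
--     else:
--         level = "LOW"
--
--     return risk_score, level
-- ===== SOURCE B (Python) =====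
-- RISK_KEYWORDS = frozenset((
--     "litigation", "penalty", "regulatory", "dependent",
--     "volatile", "uncertain", "loss", "adverse", "risk",
-- ))
--
-- THRESHOLDS = ((300, "HIGH"), (150, "MEDIUM"))
--
-- def _level(score):
--     for bound, name in THRESHOLDS:
--         if score > bound:
--             return name
--     return "LOW"
--
-- def risk_analysis(text):
--     hits = [w for w in text.split() if w in RISK_KEYWORDS]
--     risk_score = len(hits)
--     return risk_score, _level(risk_score)
-- ===== Notes on version B (the rewrite author's own statement) =====
-- stated objective: simpler
-- what changed: The score is the length of the list of words filtered through a keyword set (no Counter index over all words, no sum of nine lookups), and the level comes from scanning a threshold table helper instead of an inline if/elif chain.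
import Mathlib
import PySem

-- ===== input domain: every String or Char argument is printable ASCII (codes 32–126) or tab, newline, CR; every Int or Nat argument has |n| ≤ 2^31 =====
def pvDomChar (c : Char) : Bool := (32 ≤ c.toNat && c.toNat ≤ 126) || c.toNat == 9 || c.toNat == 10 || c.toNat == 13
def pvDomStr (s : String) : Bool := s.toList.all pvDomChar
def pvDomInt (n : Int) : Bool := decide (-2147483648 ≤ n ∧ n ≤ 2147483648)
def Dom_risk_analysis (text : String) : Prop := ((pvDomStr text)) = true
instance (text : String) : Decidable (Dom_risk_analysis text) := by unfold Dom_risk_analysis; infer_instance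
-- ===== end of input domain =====

-- B computes the score as the length of the keyword-filtered word list and the
-- level by scanning a threshold table, replacing A's Counter index plus sum of
-- nine lookups and inline if/elif chain (simpler).


-- ===== PORT A =====
def risk_analysis (text : String) : Int × String :=
  let risk_keywords : List String :=
    ["litigation", "penalty", "regulatory", "dependent",
     "volatile", "uncertain", "loss", "adverse", "risk"]
  let words := PySem.Str.split₀ text
  let counts := PySem.Dict.counter words
  let risk_score : Int := (risk_keywords.map (fun k => counts.getD k 0)).sum
  let level : String :=
    if risk_score > 300 then "HIGH"
    else if risk_score > 150 then "MEDIUM"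
    else "LOW"
  (risk_score, level)

-- ===== PORT B =====
def RISK_KEYWORDS : PySem.Set String :=
  PySem.Set.ofList
    ["litigation", "penalty", "regulatory", "dependent",
     "volatile", "uncertain", "loss", "adverse", "risk"]

def THRESHOLDS : List (Int × String) := [(300, "HIGH"), (150, "MEDIUM")]

def levelOf : List (Int × String) → Int → String
  | [], _ => "LOW"
  | (bound, name) :: rest, score =>
      if score > bound then name else levelOf rest score

def risk_analysis_alt (text : String) : Int × String :=
  let hits := (PySem.Str.split₀ text).filter (fun w => RISK_KEYWORDS.contains w)
  let risk_score : Int := (hits.length : Int)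
  (risk_score, levelOf THRESHOLDS risk_score)

-- ===== PRECONDITION & SPEC =====
def Spec_risk_analysis (text : String) (out : Int × String) : Prop := out = risk_analysis_alt text
instance (text : String) (out : Int × String) : Decidable (Spec_risk_analysis text out) := by unfold Spec_risk_analysis; infer_instance

-- ===== CLAIM =====
def Claim_equal_risk_analysis : Prop := ∀ (text : String), Dom_risk_analysis text → Spec_risk_analysis text (risk_analysis text)

-- ===== LEMMAS AND PROOFS =====

-- For a duplicate-free keyword list K, summing each keyword's count in ws
-- equals counting the words of ws that lie in K.
theorem sum_counts (K : List String) (hK : K.Nodup) (ws : List String) :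
    (K.map (fun k => ((List.count k ws : Nat) : Int))).sum
      = ((List.countP (fun w => K.contains w) ws : Nat) : Int) := by
  induction ws with
  | nil => simp
  | cons w ws ih =>
    have hstep : (K.map (fun k => ((List.count k (w :: ws) : Nat) : Int))).sum
        = (K.map (fun k => ((List.count k ws : Nat) : Int))).sum
          + (K.map (fun k => if w == k then (1:Int) else 0)).sum := by
      rw [← PySem.List.sum_map_add_int]
      rw [List.map_congr_left]
      intro k _
      simp [List.count_cons]
    have hmid : (K.map (fun k => if w == k then (1:Int) else 0)).sum
        = ((List.countP (fun k => w == k) K : Nat) : Int) :=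
      PySem.List.sum_map_ite_one_zero (fun k => w == k) K
    have hcc : List.countP (fun k => w == k) K = List.count w K := by
      unfold List.count
      apply List.countP_congr
      intro k _
      rw [Bool.beq_comm (a := w) (b := k)]
    rw [hstep, ih, hmid, hcc, List.countP_cons]
    by_cases hw : w ∈ K
    · rw [List.count_eq_one_of_mem hK hw]
      have hc : K.contains w = true := List.elem_eq_true_of_mem hw
      rw [hc]
      simp
    · rw [List.count_eq_zero_of_not_mem hw]
      have hc : K.contains w = false := by
        rcases h : K.contains w
        · rfl
        · exact absurd (List.mem_of_elem_eq_true h) hw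
      rw [hc]
      simp

-- A's risk score (sum of counter lookups) equals B's (length of the filtered list).
theorem scores_eq (ws : List String) :
    ((["litigation", "penalty", "regulatory", "dependent",
       "volatile", "uncertain", "loss", "adverse", "risk"] : List String).map
        (fun k => (PySem.Dict.counter ws).getD k 0)).sum
      = ((ws.filter (fun w => RISK_KEYWORDS.contains w)).length : Int) := by
  have hmap : (["litigation", "penalty", "regulatory", "dependent",
       "volatile", "uncertain", "loss", "adverse", "risk"] : List String).map
        (fun k => (PySem.Dict.counter ws).getD k 0)
      = (["litigation", "penalty", "regulatory", "dependent",
       "volatile", "uncertain", "loss", "adverse", "risk"] : List String).map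
        (fun k => ((List.count k ws : Nat) : Int)) := by
    rw [List.map_congr_left]
    intro k _
    exact PySem.Dict.getD_counter ws k
  rw [hmap, sum_counts _ (by decide) ws, ← List.countP_eq_length_filter]
  rfl

-- B's threshold-table scan equals A's if/elif chain.
theorem level_eq (s : Int) :
    levelOf THRESHOLDS s
      = (if s > 300 then "HIGH" else if s > 150 then "MEDIUM" else "LOW") := by
  simp [levelOf, THRESHOLDS]

-- ===== VERDICT =====
theorem risk_analysis_spec : Claim_equal_risk_analysis := by
  intro text _
  unfold Spec_risk_analysis risk_analysis risk_analysis_alt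
  simp only []
  rw [scores_eq, level_eq]
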